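-- pv_equiv track=rewrite | github.com/BitnooriLee/Code-Signal_Python | Arcade/commonCharacterCount.py | commonCharacterCount
-- ===== SOURCE A (Python) =====
-- def commonCharacterCount(s1, s2):
--     s11=list(s1)
--     s12=list(s2)
--     count=0
--     for c in s11:
--         if c in s12:
--             count+=1
--             s12.remove(c)
--
--     return count
-- ===== SOURCE B (Python) =====
-- def commonCharacterCount(s1, s2):
--     a = sorted(s1)
--     b = sorted(s2)
--     i = j = count = 0
--     while i < len(a) and j < len(b):
--         if a[i] == b[j]:
--             count += 1
--             i += 1
--             j += 1
--         elif a[i] < b[j]: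
--             i += 1
--         else:
--             j += 1
--     return count
-- ===== Notes on version B (the rewrite author's own statement) =====
-- stated objective: faster
-- what changed: Replaces A's per-character membership test and list.remove scan (quadratic) with sorting both strings once and counting matches in a single two-pointer merge pass.
import Mathlib
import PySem

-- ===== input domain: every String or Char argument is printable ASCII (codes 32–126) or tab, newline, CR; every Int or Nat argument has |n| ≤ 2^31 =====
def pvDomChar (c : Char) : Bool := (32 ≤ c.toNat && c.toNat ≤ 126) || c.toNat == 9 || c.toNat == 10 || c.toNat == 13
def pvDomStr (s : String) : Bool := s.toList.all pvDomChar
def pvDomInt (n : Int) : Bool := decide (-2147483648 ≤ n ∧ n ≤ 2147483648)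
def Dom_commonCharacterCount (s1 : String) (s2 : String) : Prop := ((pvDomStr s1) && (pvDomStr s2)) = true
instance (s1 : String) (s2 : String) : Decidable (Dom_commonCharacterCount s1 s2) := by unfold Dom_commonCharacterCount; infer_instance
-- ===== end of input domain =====

-- B replaces A's quadratic membership-test-and-remove loop by sorting both strings and
-- counting common characters in one two-pointer merge pass (objective: faster).


-- ===== PORT A =====
-- for c in s11: if c in s12: count += 1; s12.remove(c)   (state: (s12, count))
def commonCharacterCount (s1 : String) (s2 : String) : Int :=
  let s11 := s1.toList
  let s12 := s2.toList
  (s11.foldl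
    (fun (st : List Char × Int) c =>
      if st.1.contains c then ((PySem.List.remove? st.1 c).getD st.1, st.2 + 1) else st)
    (s12, 0)).2

-- ===== PORT B =====
-- the while-loop of Source B: two indices walking the two sorted lists, written as
-- recursion on the unconsumed suffixes a[i:], b[j:]
def pvMergeCount : List Char → List Char → Int
  | x :: a, y :: b =>
      if x == y then pvMergeCount a b + 1
      else if x < y then pvMergeCount a (y :: b)
      else pvMergeCount (x :: a) b
  | _, _ => 0
termination_by a b => a.length + b.length
decreasing_by all_goals (simp only [List.length_cons]; omega)

def commonCharacterCount_alt (s1 : String) (s2 : String) : Int :=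
  pvMergeCount (PySem.List.sorted s1.toList (fun x => x) false)
               (PySem.List.sorted s2.toList (fun x => x) false)

-- ===== PRECONDITION & SPEC =====
def Spec_commonCharacterCount (s1 : String) (s2 : String) (out : Int) : Prop := out = commonCharacterCount_alt s1 s2
instance (s1 : String) (s2 : String) (out : Int) : Decidable (Spec_commonCharacterCount s1 s2 out) := by unfold Spec_commonCharacterCount; infer_instance

-- ===== CLAIM (what is proved, stated in full; the proofs are below) =====
def Claim_equal_commonCharacterCount : Prop := ∀ (s1 : String) (s2 : String), Dom_commonCharacterCount s1 s2 → Spec_commonCharacterCount s1 s2 (commonCharacterCount s1 s2)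

-- ===== LEMMAS AND PROOFS =====

-- A's loop computes count + |multiset intersection| of the remaining work
theorem pvFoldA_eq (l : List Char) :
    ∀ (s12 : List Char) (count : Int),
    (l.foldl
      (fun (st : List Char × Int) c =>
        if st.1.contains c then ((PySem.List.remove? st.1 c).getD st.1, st.2 + 1) else st)
      (s12, count)).2
      = count + (Multiset.card ((l : Multiset Char) ∩ (s12 : Multiset Char)) : Int) := by
  induction l with
  | nil => intro s12 count; simp
  | cons c l ih =>
      intro s12 count
      by_cases h : c ∈ s12
      · have hc : s12.contains c = true := by simpa using h
        simp only [List.foldl_cons, hc, if_true,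
          PySem.List.remove?_eq_some_erase _ _ h, Option.getD_some]
        rw [ih]
        have hm : ((c :: l : List Char) : Multiset Char) ∩ (s12 : Multiset Char)
            = c ::ₘ ((l : Multiset Char) ∩ ((s12 : Multiset Char).erase c)) :=
          Multiset.cons_inter_of_pos (t := (s12 : Multiset Char)) (l : Multiset Char)
            (by simpa using h)
        rw [hm, Multiset.card_cons, Multiset.coe_erase]
        push_cast
        ring
      · have hc : s12.contains c = false := by simpa using h
        simp only [List.foldl_cons, hc, Bool.false_eq_true, if_false]
        rw [ih]
        have hm : ((c :: l : List Char) : Multiset Char) ∩ (s12 : Multiset Char)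
            = (l : Multiset Char) ∩ (s12 : Multiset Char) :=
          Multiset.cons_inter_of_neg (t := (s12 : Multiset Char)) (l : Multiset Char)
            (by simpa using h)
        rw [hm]

-- B's merge on two sorted lists counts the multiset intersection
theorem pvMergeCount_eq : ∀ (a b : List Char),
    a.Pairwise (· ≤ ·) → b.Pairwise (· ≤ ·) →
    pvMergeCount a b = (Multiset.card ((a : Multiset Char) ∩ (b : Multiset Char)) : Int) := by
  intro a b
  induction a, b using pvMergeCount.induct with
  | case1 x a y b heq ih =>
      intro ha hb
      have hxy : x = y := by simpa using heq
      subst hxy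
      rw [pvMergeCount]
      simp only [heq, if_true]
      have hm : ((x :: a : List Char) : Multiset Char) ∩ ((x :: b : List Char) : Multiset Char)
          = x ::ₘ ((a : Multiset Char) ∩ (b : Multiset Char)) := by
        have h0 := Multiset.cons_inter_of_pos (t := ((x :: b : List Char) : Multiset Char))
          (a : Multiset Char) (a := x) (by simp)
        simpa using h0
      rw [hm, ih ha.tail hb.tail, Multiset.card_cons]
      push_cast
      ring
  | case2 x a y b heq hlt ih =>
      intro ha hb
      rw [pvMergeCount]
      simp only [heq, hlt, if_true, Bool.false_eq_true, if_false]
      have hxlt : x < y := by simpa using hlt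
      have hx : x ∉ (y :: b) := by
        intro hmem
        rcases List.mem_cons.1 hmem with h | h
        · exact absurd h (ne_of_lt hxlt)
        · exact absurd (lt_of_lt_of_le hxlt (List.rel_of_pairwise_cons hb h)) (lt_irrefl x)
      have hm : ((x :: a : List Char) : Multiset Char) ∩ ((y :: b : List Char) : Multiset Char)
          = (a : Multiset Char) ∩ ((y :: b : List Char) : Multiset Char) :=
        Multiset.cons_inter_of_neg (t := ((y :: b : List Char) : Multiset Char))
          (a : Multiset Char) (by simpa using hx)
      rw [hm, ih ha.tail hb]
  | case3 x a y b heq hnlt ih =>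
      intro ha hb
      rw [pvMergeCount]
      simp only [heq, hnlt, Bool.false_eq_true, if_false]
      have hylt : y < x := by
        have h1 : ¬ x = y := by simpa using heq
        have h2 : ¬ x < y := by simpa using hnlt
        exact lt_of_le_of_ne (not_lt.mp h2) (fun e => h1 e.symm)
      have hy : y ∉ (x :: a) := by
        intro hmem
        rcases List.mem_cons.1 hmem with h | h
        · exact absurd h.symm (ne_of_gt hylt)
        · exact absurd (lt_of_lt_of_le hylt (List.rel_of_pairwise_cons ha h)) (lt_irrefl y)
      have hm : ((x :: a : List Char) : Multiset Char) ∩ ((y :: b : List Char) : Multiset Char)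
          = ((x :: a : List Char) : Multiset Char) ∩ ((b : List Char) : Multiset Char) := by
        rw [Multiset.inter_comm, Multiset.inter_comm ((x :: a : List Char) : Multiset Char)]
        exact Multiset.cons_inter_of_neg (t := ((x :: a : List Char) : Multiset Char))
          (b : Multiset Char) (by simpa using hy)
      rw [hm, ih ha hb.tail]
  | case4 a b h =>
      intro _ _
      cases a with
      | nil => simp [pvMergeCount]
      | cons x a' =>
          cases b with
          | nil => simp [pvMergeCount]
          | cons y b' => exact (h x a' y b' rfl rfl).elim

-- ===== VERDICT (by name: the statement is the Claim_ definition above) =====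
theorem commonCharacterCount_spec : Claim_equal_commonCharacterCount := by
  intro s1 s2 _
  unfold Spec_commonCharacterCount commonCharacterCount commonCharacterCount_alt
  have hA := pvFoldA_eq s1.toList s2.toList 0
  have hB := pvMergeCount_eq (PySem.List.sorted s1.toList (fun x => x) false)
      (PySem.List.sorted s2.toList (fun x => x) false)
      (by simpa using PySem.List.sorted_pairwise s1.toList (fun x => x))
      (by simpa using PySem.List.sorted_pairwise s2.toList (fun x => x))
  have e1 : ((PySem.List.sorted s1.toList (fun x => x) false : List Char) : Multiset Char)
      = (s1.toList : Multiset Char) := Quot.sound (PySem.List.sorted_perm _ _ _)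
  have e2 : ((PySem.List.sorted s2.toList (fun x => x) false : List Char) : Multiset Char)
      = (s2.toList : Multiset Char) := Quot.sound (PySem.List.sorted_perm _ _ _)
  rw [hB, e1, e2]
  simpa using hA
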